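-- pv_equiv track=rewrite | github.com/Pestap/MetodyNumeryczne | Projekt2/Functions.py | generateBandMatrix
-- ===== SOURCE A (Python) =====
-- def generateBandMatrix(a1, a2, a3, N):
--     # dla numeru indeksu: 184531
--     matrix = []
--     for i in range(N):
--         row = [0] * N
--         for j in range(N):
--             # główna przekątna
--             if i == j:
--                 row[j] = a1
--             # drugie przekątne
--             elif i == j - 1 or i == j + 1:
--                 row[j] = a2
--             # trzecie przekątnę
--             elif i == j - 2 or i == j + 2:
--                 row[j] = a3
--             # cała reszta
--             else:
--                 row[j] = 0
--         matrix.append(row)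
--
--     return matrix
-- ===== SOURCE B (Python) =====
-- def generateBandMatrix(a1, a2, a3, N):
--     # Fill only the five band entries of each row of a zero matrix;
--     # no inner scan over all columns, no per-cell branch chain.
--     matrix = []
--     for i in range(N):
--         row = [0] * N
--         row[i] = a1
--         if i - 1 >= 0:
--             row[i - 1] = a2
--         if i + 1 < N:
--             row[i + 1] = a2
--         if i - 2 >= 0:
--             row[i - 2] = a3
--         if i + 2 < N:
--             row[i + 2] = a3
--         matrix.append(row)
--     return matrix
-- ===== Notes on version B (the rewrite author's own statement) =====
-- stated objective: faster
-- what changed: Instead of scanning every column of every row with a 4-way branch chain per cell, B writes only the at-most-five band entries of each zero row, doing constant work per row beyond the zero allocation.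
import Mathlib
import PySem

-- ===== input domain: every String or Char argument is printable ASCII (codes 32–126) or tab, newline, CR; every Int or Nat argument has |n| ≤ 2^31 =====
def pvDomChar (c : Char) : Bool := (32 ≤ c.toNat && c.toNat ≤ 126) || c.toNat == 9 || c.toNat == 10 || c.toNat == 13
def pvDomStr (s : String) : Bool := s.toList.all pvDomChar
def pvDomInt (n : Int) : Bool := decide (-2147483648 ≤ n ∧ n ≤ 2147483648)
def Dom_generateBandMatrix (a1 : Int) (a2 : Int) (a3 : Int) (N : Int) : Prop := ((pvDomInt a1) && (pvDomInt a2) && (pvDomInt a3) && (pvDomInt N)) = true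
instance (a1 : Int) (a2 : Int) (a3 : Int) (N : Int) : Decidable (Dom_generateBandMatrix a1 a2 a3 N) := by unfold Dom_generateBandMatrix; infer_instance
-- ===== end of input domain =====

-- B fills only the at-most-five band entries of each zero row instead of scanning
-- every column with a branch chain per cell; equal output is proved for all inputs.

-- ===== PORT A =====
-- literal transliteration of A: per row, an inner loop over all columns j
-- assigning via a 4-way branch chain
def generateBandMatrix (a1 : Int) (a2 : Int) (a3 : Int) (N : Int) : List (List Int) :=
  (PySem.List.pyRange 0 N 1).foldl (fun matrix i =>
    let row := PySem.List.pyRepeat [(0 : Int)] N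
    let row := (PySem.List.pyRange 0 N 1).foldl (fun row j =>
      if i == j then PySem.List.pySetD row j a1
      else if i == j - 1 || i == j + 1 then PySem.List.pySetD row j a2
      else if i == j - 2 || i == j + 2 then PySem.List.pySetD row j a3
      else PySem.List.pySetD row j 0) row
    matrix ++ [row]) []

-- ===== PORT B =====
-- literal transliteration of B: zero row, then at most five guarded band writes
def generateBandMatrix_alt (a1 : Int) (a2 : Int) (a3 : Int) (N : Int) : List (List Int) :=
  (PySem.List.pyRange 0 N 1).foldl (fun matrix i =>
    let row := PySem.List.pyRepeat [(0 : Int)] N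
    let row := PySem.List.pySetD row i a1
    let row := if i - 1 ≥ 0 then PySem.List.pySetD row (i - 1) a2 else row
    let row := if i + 1 < N then PySem.List.pySetD row (i + 1) a2 else row
    let row := if i - 2 ≥ 0 then PySem.List.pySetD row (i - 2) a3 else row
    let row := if i + 2 < N then PySem.List.pySetD row (i + 2) a3 else row
    matrix ++ [row]) []

-- ===== PRECONDITION & SPEC =====
def Spec_generateBandMatrix (a1 : Int) (a2 : Int) (a3 : Int) (N : Int) (out : List (List Int)) : Prop := out = generateBandMatrix_alt a1 a2 a3 N
instance (a1 : Int) (a2 : Int) (a3 : Int) (N : Int) (out : List (List Int)) : Decidable (Spec_generateBandMatrix a1 a2 a3 N out) := by unfold Spec_generateBandMatrix; infer_instance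

-- ===== CLAIM (what is proved, stated in full; the proofs are below) =====
def Claim_equal_generateBandMatrix : Prop := ∀ (a1 : Int) (a2 : Int) (a3 : Int) (N : Int), Dom_generateBandMatrix a1 a2 a3 N → Spec_generateBandMatrix a1 a2 a3 N (generateBandMatrix a1 a2 a3 N)

-- ===== LEMMAS AND PROOFS =====

-- the band value A's branch chain assigns at column j of row i
def pvEntry (a1 a2 a3 : Int) (i j : Int) : Int :=
  if i = j then a1
  else if i = j - 1 ∨ i = j + 1 then a2
  else if i = j - 2 ∨ i = j + 2 then a3
  else 0

-- A's inner loop over an index range, rewritten as the map of pvEntry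
lemma foldl_pySetD_range (g : Int → Int) : ∀ (m : Nat) (l : List Int), m ≤ l.length →
    (PySem.List.pyRange 0 (m : Int) 1).foldl (fun r j => PySem.List.pySetD r j (g j)) l
      = (PySem.List.pyRange 0 (m : Int) 1).map g ++ l.drop m := by
  intro m
  induction m with
  | zero => intro l _; simp [PySem.List.pyRange_one_eq_nil]
  | succ m ih =>
    intro l hm
    have hcast : ((m + 1 : Nat) : Int) = (m : Int) + 1 := by push_cast; ring
    rw [hcast, PySem.List.pyRange_one_succ_right (by positivity)]
    rw [List.foldl_append, List.map_append, ih l (by omega)]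
    have hlt : m < l.length := by omega
    rw [List.foldl_cons, List.foldl_nil, List.map_cons, List.map_nil,
        PySem.List.pySetD_natCast]
    rw [List.drop_eq_getElem_cons hlt]
    rw [List.set_append_right _ _ (by simp [PySem.List.length_pyRange_one])]
    simp only [List.length_map, PySem.List.length_pyRange_one, sub_zero, Int.toNat_natCast,
      Nat.sub_self, List.set_cons_zero, List.append_assoc, List.cons_append, List.nil_append]

-- the rows built by the two programs agree for row index ii < n
lemma row_eq (a1 a2 a3 : Int) (n ii : Nat) (hii : ii < n) :
    ((PySem.List.pyRange 0 (n : Int) 1).foldl (fun row j =>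
      if (ii : Int) == j then PySem.List.pySetD row j a1
      else if (ii : Int) == j - 1 || (ii : Int) == j + 1 then PySem.List.pySetD row j a2
      else if (ii : Int) == j - 2 || (ii : Int) == j + 2 then PySem.List.pySetD row j a3
      else PySem.List.pySetD row j 0) (PySem.List.pyRepeat [(0 : Int)] (n : Int)))
    = (let row := PySem.List.pyRepeat [(0 : Int)] (n : Int)
       let row := PySem.List.pySetD row (ii : Int) a1
       let row := if (ii : Int) - 1 ≥ 0 then PySem.List.pySetD row ((ii : Int) - 1) a2 else row
       let row := if (ii : Int) + 1 < (n : Int) then PySem.List.pySetD row ((ii : Int) + 1) a2 else row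
       let row := if (ii : Int) - 2 ≥ 0 then PySem.List.pySetD row ((ii : Int) - 2) a3 else row
       if (ii : Int) + 2 < (n : Int) then PySem.List.pySetD row ((ii : Int) + 2) a3 else row) := by
  have hbody : (PySem.List.pyRange 0 (n : Int) 1).foldl (fun row j =>
      if (ii : Int) == j then PySem.List.pySetD row j a1
      else if (ii : Int) == j - 1 || (ii : Int) == j + 1 then PySem.List.pySetD row j a2
      else if (ii : Int) == j - 2 || (ii : Int) == j + 2 then PySem.List.pySetD row j a3
      else PySem.List.pySetD row j 0) (PySem.List.pyRepeat [(0 : Int)] (n : Int))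
      = (PySem.List.pyRange 0 (n : Int) 1).foldl
          (fun r j => PySem.List.pySetD r j (pvEntry a1 a2 a3 (ii : Int) j))
          (PySem.List.pyRepeat [(0 : Int)] (n : Int)) := by
    apply PySem.List.foldl_congr_mem
    intro acc x _
    simp only [pvEntry, beq_iff_eq, Bool.or_eq_true]
    split_ifs <;> rfl
  rw [hbody, PySem.List.pyRepeat_singleton]
  rw [foldl_pySetD_range _ n _ (by simp)]
  simp only [Int.toNat_natCast, List.drop_replicate, Nat.sub_self, List.replicate_zero,
    List.append_nil]
  -- turn every guarded pySetD into List.set at a Nat index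
  simp only [show ((ii : Int) + 1) = ((ii + 1 : Nat) : Int) by push_cast; ring,
    show ((ii : Int) + 2) = ((ii + 2 : Nat) : Int) by push_cast; ring,
    PySem.List.pySetD_natCast,
    show ((ii + 1 : Nat) : Int) < (n : Int) ↔ ii + 1 < n from Nat.cast_lt,
    show ((ii + 2 : Nat) : Int) < (n : Int) ↔ ii + 2 < n from Nat.cast_lt,
    show (0 : Int) ≤ (ii : Int) - 1 ↔ 1 ≤ ii by omega,
    show (0 : Int) ≤ (ii : Int) - 2 ↔ 2 ≤ ii by omega]
  by_cases h1 : 1 ≤ ii <;> by_cases h2 : ii + 1 < n <;>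
    by_cases h3 : 2 ≤ ii <;> by_cases h4 : ii + 2 < n <;>
    simp only [h1, h2, h3, h4, if_true, if_false] <;>
    (try rw [show ((ii : Int) - 1) = ((ii - 1 : Nat) : Int) from by omega]) <;>
    (try rw [show ((ii : Int) - 2) = ((ii - 2 : Nat) : Int) from by omega]) <;>
    (try simp only [PySem.List.pySetD_natCast]) <;>
    (apply List.ext_getElem
     · simp [PySem.List.length_pyRange_one]
     · intro k hk1 hk2
       have hkn : k < n := by simpa [PySem.List.length_pyRange_one] using hk1
       rw [List.getElem_map, PySem.List.getElem_pyRange_one]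
       simp only [zero_add, List.getElem_set, List.getElem_replicate, pvEntry]
       split_ifs <;> first | rfl | omega)

theorem pv_main (a1 a2 a3 N : Int) :
    generateBandMatrix a1 a2 a3 N = generateBandMatrix_alt a1 a2 a3 N := by
  unfold generateBandMatrix generateBandMatrix_alt
  apply PySem.List.foldl_congr_mem
  intro acc i hi
  rw [PySem.List.mem_pyRange_one] at hi
  obtain ⟨ii, rfl⟩ : ∃ ii : ℕ, i = (ii : Int) := ⟨i.toNat, by omega⟩
  obtain ⟨n, rfl⟩ : ∃ n : ℕ, N = (n : Int) := ⟨N.toNat, by omega⟩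
  have hii : ii < n := by exact_mod_cast hi.2
  simp only []
  rw [row_eq a1 a2 a3 n ii hii]

-- ===== VERDICT (by name: the statement is the Claim_ definition above) =====
theorem generateBandMatrix_spec : Claim_equal_generateBandMatrix := by
  intro a1 a2 a3 N _
  exact pv_main a1 a2 a3 N
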